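-- pv_equiv track=rewrite | github.com/CJary/Projects | RPI Projects/CS1100/hw4/hw4_part1.py | NYL
-- ===== SOURCE A (Python) =====
-- def NYL(passw):
--     nscore = 0
--     a_z = 0
--     num = 0
--     for letters in passw:
--         if letters.isalpha() and a_z < 3:
--             a_z += 1
--         elif letters.isnumeric() and num < 4 and a_z == 3:
--             num += 1
--         if a_z == 3 and num == 4:
--             nscore -= 2
--     return nscore
-- ===== SOURCE B (Python) =====
-- def NYL(passw):
--     a_z = 0
--     num = 0
--     for i, ch in enumerate(passw):
--         if ch.isalpha() and a_z < 3:
--             a_z += 1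
--         elif ch.isnumeric() and num < 4 and a_z == 3:
--             num += 1
--         if a_z == 3 and num == 4:
--             # the character completing the pattern already counts: inclusive tail
--             return -2 * (len(passw) - i)
--     return 0
-- ===== Notes on version B (the rewrite author's own statement) =====
-- stated objective: alternative
-- what changed: B stops scanning as soon as both counters saturate (a_z==3, num==4) and returns the closed form -2*(len-i) for the remaining tail, instead of A's single accumulating pass that keeps looping and subtracts 2 per remaining character.
import Mathlib
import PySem

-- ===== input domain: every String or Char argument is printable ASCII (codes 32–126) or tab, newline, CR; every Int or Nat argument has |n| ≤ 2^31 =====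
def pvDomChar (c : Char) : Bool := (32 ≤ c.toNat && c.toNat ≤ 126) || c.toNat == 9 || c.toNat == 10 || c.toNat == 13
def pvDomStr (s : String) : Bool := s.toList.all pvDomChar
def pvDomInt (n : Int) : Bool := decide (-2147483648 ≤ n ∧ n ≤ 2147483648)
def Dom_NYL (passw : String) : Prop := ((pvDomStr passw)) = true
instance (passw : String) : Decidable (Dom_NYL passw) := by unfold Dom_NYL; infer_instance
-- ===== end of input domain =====

-- B stops the scan at the character that saturates both counters and returns the tail
-- score by arithmetic, instead of A's accumulating pass over the whole string (alternative decomposition).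
-- 'isnumeric' is ported as PySem.Chars.isdigit: exact on the printable-ASCII domain.

-- ===== PORT A =====
-- one loop step of A: the if/elif counter update, then the conditional nscore -= 2
def pvStepA (st : Int × Int × Int) (c : Char) : Int × Int × Int :=
  let nscore := st.1
  let a_z := st.2.1
  let num := st.2.2
  let p :=
    if PySem.Chars.isalpha c && decide (a_z < 3) then (a_z + 1, num)
    else if PySem.Chars.isdigit c && decide (num < 4) && decide (a_z = 3) then (a_z, num + 1)
    else (a_z, num)
  (if p.1 = 3 ∧ p.2 = 4 then nscore - 2 else nscore, p.1, p.2)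

def NYL (passw : String) : Int :=
  (passw.toList.foldl pvStepA (0, 0, 0)).1

-- ===== PORT B =====
-- B's loop: scan with index until a_z==3 and num==4, then return -2*(total - i); 0 if never
def pvGoB (total : Int) : List Char → Int → Int → Int → Int
  | [], _, _, _ => 0
  | c :: rest, i, a_z, num =>
    let p :=
      if PySem.Chars.isalpha c && decide (a_z < 3) then (a_z + 1, num)
      else if PySem.Chars.isdigit c && decide (num < 4) && decide (a_z = 3) then (a_z, num + 1)
      else (a_z, num)
    if p.1 = 3 ∧ p.2 = 4 then -2 * (total - i)
    else pvGoB total rest (i + 1) p.1 p.2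

def NYL_alt (passw : String) : Int :=
  pvGoB (PySem.Str.len passw) passw.toList 0 0 0

-- ===== PRECONDITION & SPEC =====
def Spec_NYL (passw : String) (out : Int) : Prop := out = NYL_alt passw
instance (passw : String) (out : Int) : Decidable (Spec_NYL passw out) := by unfold Spec_NYL; infer_instance

-- ===== CLAIM (what is proved, stated in full; the proofs are below) =====
def Claim_equal_NYL : Prop := ∀ (passw : String), Dom_NYL passw → Spec_NYL passw (NYL passw)

-- ===== LEMMAS AND PROOFS =====

-- once both counters are saturated, A only subtracts 2 per remaining character
theorem pvFoldA_sat (l : List Char) (s : Int) :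
    (l.foldl pvStepA (s, 3, 4)).1 = s - 2 * l.length := by
  induction l generalizing s with
  | nil => simp
  | cons c rest ih =>
    simp only [List.foldl, pvStepA]
    norm_num
    rw [ih]
    ring

-- A's fold from an unsaturated state equals the start score plus B's scan-until-saturation value
theorem pvFoldA_go (l : List Char) (s a n i total : Int)
    (hsat : ¬ (a = 3 ∧ n = 4)) (hlen : i + l.length = total) :
    (l.foldl pvStepA (s, a, n)).1 = s + pvGoB total l i a n := by
  induction l generalizing s a n i with
  | nil => simp [pvGoB]
  | cons c rest ih =>
    simp only [List.foldl, pvStepA, pvGoB]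
    set p :=
      (if PySem.Chars.isalpha c && decide (a < 3) then (a + 1, n)
       else if PySem.Chars.isdigit c && decide (n < 4) && decide (a = 3) then (a, n + 1)
       else (a, n)) with hp
    by_cases h : p.1 = 3 ∧ p.2 = 4
    · simp only [h, if_pos, and_self]
      rw [pvFoldA_sat]
      simp only [List.length_cons] at hlen
      omega
    · simp only [if_neg h]
      rw [ih (s := s) (a := p.1) (n := p.2) (i := i + 1) h]
      simp only [List.length_cons] at hlen
      omega

-- ===== VERDICT (by name: the statement is the Claim_ definition above) =====
theorem NYL_spec : Claim_equal_NYL := by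
  intro passw _
  unfold Spec_NYL NYL NYL_alt
  rw [pvFoldA_go passw.toList 0 0 0 0 (PySem.Str.len passw) (by simp) (by
    simp [PySem.Str.len])]
  ring
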